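-- pv_equiv track=rewrite | github.com/kimghw/hwp_xml | excel/table_placement.py | map_columns_to_unified
-- ===== SOURCE A (Python) =====
-- from typing import List, Dict, Tuple
--
-- def map_columns_to_unified(
--     table_boundaries: List[int], unified_boundaries: List[int],
--     tolerance: int = 200
-- ) -> Dict[int, tuple]:
--     """
--     테이블 원본 열 인덱스 -> 통합 그리드 (시작열, 끝열) 매핑
--     근접 매칭 지원
--
--     Args:
--         tolerance: 이 값 이하 차이는 같은 경계로 간주 (HWPUNIT, ~0.7mm)
--
--     Returns:
--         {원본_col_idx: (unified_start_col, unified_end_col)}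
--     """
--     mapping = {}
--
--     def find_nearest(x: int) -> int:
--         """가장 가까운 통합 경계 인덱스 찾기"""
--         best_idx = 0
--         best_diff = abs(unified_boundaries[0] - x)
--         for i, b in enumerate(unified_boundaries):
--             diff = abs(b - x)
--             if diff < best_diff:
--                 best_diff = diff
--                 best_idx = i
--         return best_idx if best_diff <= tolerance else -1
--
--     for orig_col in range(len(table_boundaries) - 1):
--         start_x = table_boundaries[orig_col]
--         end_x = table_boundaries[orig_col + 1]
--
--         unified_start = find_nearest(start_x)
--         unified_end = find_nearest(end_x)
--
--         if unified_start >= 0 and unified_end >= 0: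
--             mapping[orig_col] = (unified_start, unified_end)
--
--     return mapping
-- ===== SOURCE B (Python) =====
-- # Different algorithm: sort the unified boundaries once (value, index), collapse
-- # duplicate values keeping the smallest index, then binary-search each table
-- # boundary; tie between lower/upper neighbour resolved by (distance, index),
-- # which reproduces A's first-minimum linear scan exactly.
-- def map_columns_to_unified(table_boundaries, unified_boundaries, tolerance=200):
--     mapping = {}
--     n = len(table_boundaries)
--     if n < 2:
--         return mapping
--
--     pairs = sorted((b, i) for i, b in enumerate(unified_boundaries))
--     uniq = []
--     prev = None
--     for v, i in pairs:
--         if prev is None or v != prev: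
--             uniq.append((v, i))
--         prev = v
--     uvals = [v for v, _ in uniq]
--
--     def bisect_left(a, x):
--         lo, hi = 0, len(a)
--         while lo < hi:
--             mid = (lo + hi) // 2
--             if a[mid] < x:
--                 lo = mid + 1
--             else:
--                 hi = mid
--         return lo
--
--     def nearest(x):
--         pos = bisect_left(uvals, x)
--         best = None
--         if pos < len(uniq):
--             v, i = uniq[pos]
--             best = (v - x, i)
--         if pos > 0:
--             v, i = uniq[pos - 1]
--             cand = (x - v, i)
--             if best is None or cand < best:
--                 best = cand
--         d, i = best
--         return i if d <= tolerance else -1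
--
--     nv = [nearest(x) for x in table_boundaries]
--     for c in range(n - 1):
--         s, e = nv[c], nv[c + 1]
--         if s >= 0 and e >= 0:
--             mapping[c] = (s, e)
--     return mapping
-- ===== Notes on version B (the rewrite author's own statement) =====
-- stated objective: faster
-- what changed: A scans all unified boundaries linearly for every table boundary; B sorts (value,index) pairs once, collapses duplicate values to their smallest index, and binary-searches each table boundary, comparing only the two neighbouring candidates with A's (distance,index) tie-break.
import Mathlib
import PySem

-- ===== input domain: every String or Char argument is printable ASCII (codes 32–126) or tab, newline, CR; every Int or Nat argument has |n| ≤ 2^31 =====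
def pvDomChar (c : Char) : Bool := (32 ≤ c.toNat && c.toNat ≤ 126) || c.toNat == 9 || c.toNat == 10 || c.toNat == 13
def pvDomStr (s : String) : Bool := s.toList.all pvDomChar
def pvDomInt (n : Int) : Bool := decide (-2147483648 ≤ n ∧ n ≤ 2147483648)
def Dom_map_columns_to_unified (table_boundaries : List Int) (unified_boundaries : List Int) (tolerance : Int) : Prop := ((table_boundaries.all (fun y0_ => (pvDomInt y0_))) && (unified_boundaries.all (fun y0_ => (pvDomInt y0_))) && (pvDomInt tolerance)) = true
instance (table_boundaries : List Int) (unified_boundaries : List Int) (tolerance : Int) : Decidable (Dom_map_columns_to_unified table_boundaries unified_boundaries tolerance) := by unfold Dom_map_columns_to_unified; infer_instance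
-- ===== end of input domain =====

-- B is a different algorithm (sort + binary search instead of a linear scan per query);
-- the proved claim is about the RETURN value (A mutates nothing observable).

-- ===== PORT A =====
-- find_nearest: linear scan keeping (best_diff, best_idx), strict '<' keeps the first minimum
def findNearestA (unified_boundaries : List Int) (tolerance x : Int) : Int :=
  let s := (PySem.List.enumerate unified_boundaries).foldl
    (fun (s : Int × Int) p => if |p.2 - x| < s.1 then (|p.2 - x|, p.1) else s)
    (|PySem.List.pyGetD unified_boundaries 0 0 - x|, 0)
  if s.1 ≤ tolerance then s.2 else -1

def map_columns_to_unified (table_boundaries : List Int) (unified_boundaries : List Int) (tolerance : Int) : List (Int × Int × Int) :=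
  let mapping := (PySem.List.pyRange 0 ((table_boundaries.length : Int) - 1) 1).foldl
    (fun (m : PySem.Dict Int (Int × Int)) oc =>
      let start_x := PySem.List.pyGetD table_boundaries oc 0
      let end_x := PySem.List.pyGetD table_boundaries (oc + 1) 0
      let us := findNearestA unified_boundaries tolerance start_x
      let ue := findNearestA unified_boundaries tolerance end_x
      if us ≥ 0 ∧ ue ≥ 0 then m.insert oc (us, ue) else m)
    PySem.Dict.empty
  mapping.items

-- ===== PORT B =====
-- the dedup loop of Source B: keep the first pair of each run of equal values
def dedupLoop (pairs : List (Int × Int)) : List (Int × Int) :=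
  (pairs.foldl (fun (s : List (Int × Int) × Option Int) p =>
      (match s.2 with
       | none => s.1 ++ [p]
       | some v => if p.1 ≠ v then s.1 ++ [p] else s.1,
       some p.1))
    ([], none)).1

-- hand-written bisect_left of Source B, ported step for step
def blLoop (a : List Int) (x : Int) (lo hi : Nat) : Nat :=
  if _h : lo < hi then
    let mid := (lo + hi) / 2
    if a.getD mid 0 < x then blLoop a x (mid + 1) hi else blLoop a x lo mid
  else lo
termination_by hi - lo
decreasing_by all_goals omega

-- nearest of Source B: binary search, then compare the two neighbouring candidates
def nearestB (uniq : List (Int × Int)) (uvals : List Int) (tolerance x : Int) : Int :=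
  let pos := blLoop uvals x 0 uvals.length
  let best0 : Option (Int × Int) :=
    if pos < uniq.length then
      let p := uniq.getD pos (0, 0)
      some (p.1 - x, p.2)
    else none
  let best : Option (Int × Int) :=
    if 0 < pos then
      let p := uniq.getD (pos - 1) (0, 0)
      let cand := (x - p.1, p.2)
      match best0 with
      | none => some cand
      | some b => if cand.1 < b.1 ∨ (cand.1 = b.1 ∧ cand.2 < b.2) then some cand else some b
    else best0
  match best with
  | some di => if di.1 ≤ tolerance then di.2 else -1
  | none => -1  -- unreachable under Pre_ (the Python raises TypeError here)

def map_columns_to_unified_alt (table_boundaries : List Int) (unified_boundaries : List Int) (tolerance : Int) : List (Int × Int × Int) :=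
  if table_boundaries.length < 2 then [] else
  let pairs := PySem.List.sorted2
    ((PySem.List.enumerate unified_boundaries).map (fun p => (p.2, p.1))) Prod.fst Prod.snd
  let uniq := dedupLoop pairs
  let uvals := uniq.map Prod.fst
  let nv := table_boundaries.map (fun x => nearestB uniq uvals tolerance x)
  let mapping := (PySem.List.pyRange 0 ((table_boundaries.length : Int) - 1) 1).foldl
    (fun (m : PySem.Dict Int (Int × Int)) c =>
      let s := PySem.List.pyGetD nv c 0
      let e := PySem.List.pyGetD nv (c + 1) 0
      if s ≥ 0 ∧ e ≥ 0 then m.insert c (s, e) else m)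
    PySem.Dict.empty
  mapping.items

-- ===== PRECONDITION & SPEC =====
-- Pre_ excludes exactly the inputs on which A raises IndexError
-- (at least two table boundaries but an empty unified_boundaries list).
def Pre_map_columns_to_unified (table_boundaries : List Int) (unified_boundaries : List Int) (tolerance : Int) : Prop :=
  2 ≤ table_boundaries.length → unified_boundaries ≠ []
instance (table_boundaries : List Int) (unified_boundaries : List Int) (tolerance : Int) : Decidable (Pre_map_columns_to_unified table_boundaries unified_boundaries tolerance) := by unfold Pre_map_columns_to_unified; infer_instance

def pvWitness_map_columns_to_unified : List Int × List Int × Int := ([0, 1000, 2050], [0, 1000, 2000], 200)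

def Spec_map_columns_to_unified (table_boundaries : List Int) (unified_boundaries : List Int) (tolerance : Int) (out : List (Int × Int × Int)) : Prop := out = map_columns_to_unified_alt table_boundaries unified_boundaries tolerance
instance (table_boundaries : List Int) (unified_boundaries : List Int) (tolerance : Int) (out : List (Int × Int × Int)) : Decidable (Spec_map_columns_to_unified table_boundaries unified_boundaries tolerance out) := by unfold Spec_map_columns_to_unified; infer_instance

-- ===== CLAIM (what is proved, stated in full; the proofs are below) =====
def Claim_equal_map_columns_to_unified : Prop := ∀ (table_boundaries : List Int) (unified_boundaries : List Int) (tolerance : Int), Dom_map_columns_to_unified table_boundaries unified_boundaries tolerance → Pre_map_columns_to_unified table_boundaries unified_boundaries tolerance → Spec_map_columns_to_unified table_boundaries unified_boundaries tolerance (map_columns_to_unified table_boundaries unified_boundaries tolerance)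

-- ===== LEMMAS AND PROOFS =====

-- the (distance, original index) key; A returns the lexicographically least key's index
def lexLe (a b : Int × Int) : Prop := a.1 < b.1 ∨ (a.1 = b.1 ∧ a.2 ≤ b.2)

def keysA (ub : List Int) (x : Int) : List (Int × Int) :=
  (PySem.List.enumerate ub).map (fun p => (|p.2 - x|, p.1))

def KMin (K : List (Int × Int)) (m : Int × Int) : Prop := m ∈ K ∧ ∀ y ∈ K, lexLe m y

lemma kmin_unique {K : List (Int × Int)} {m m' : Int × Int}
    (h : KMin K m) (h' : KMin K m') : m = m' := by
  have h1 := h.2 m' h'.1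
  have h2 := h'.2 m h.1
  unfold lexLe at h1 h2
  have : m.1 = m'.1 ∧ m.2 = m'.2 := by omega
  exact Prod.ext this.1 this.2

-- ---------- A's scan is the lexicographic minimum ----------

lemma scan_min (x : Int) (l : List Int) : ∀ (i0 : Int) (s : Int × Int), s.2 < i0 →
    (((PySem.List.enumerate l i0).foldl
        (fun (s : Int × Int) p => if |p.2 - x| < s.1 then (|p.2 - x|, p.1) else s) s) = s ∨
      ((PySem.List.enumerate l i0).foldl
        (fun (s : Int × Int) p => if |p.2 - x| < s.1 then (|p.2 - x|, p.1) else s) s) ∈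
        (PySem.List.enumerate l i0).map (fun p => (|p.2 - x|, p.1))) ∧
    lexLe ((PySem.List.enumerate l i0).foldl
        (fun (s : Int × Int) p => if |p.2 - x| < s.1 then (|p.2 - x|, p.1) else s) s) s ∧
    (∀ y ∈ (PySem.List.enumerate l i0).map (fun p => (|p.2 - x|, p.1)),
      lexLe ((PySem.List.enumerate l i0).foldl
        (fun (s : Int × Int) p => if |p.2 - x| < s.1 then (|p.2 - x|, p.1) else s) s) y) := by
  induction l with
  | nil =>
    intro i0 s hs
    refine ⟨Or.inl ?_, ?_, ?_⟩
    · simp [PySem.List.enumerate_nil]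
    · simp only [PySem.List.enumerate_nil, List.foldl_nil]
      unfold lexLe; omega
    · intro y hy
      simp [PySem.List.enumerate_nil] at hy
  | cons b t ih =>
    intro i0 s hs
    rw [PySem.List.enumerate_cons, List.foldl_cons, List.map_cons]
    dsimp only
    by_cases hbd : |b - x| < s.1
    · rw [if_pos hbd]
      have hres := ih (i0 + 1) (|b - x|, i0) (by simp)
      refine ⟨?_, ?_, ?_⟩
      · rcases hres.1 with h | h
        · right; rw [h]; exact List.mem_cons_self
        · right; exact List.mem_cons_of_mem _ h
      · have h1 := hres.2.1
        unfold lexLe at h1 ⊢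
        simp only at h1
        omega
      · intro y hy
        rcases List.mem_cons.mp hy with h | h
        · rw [h]; exact hres.2.1
        · exact hres.2.2 y h
    · rw [if_neg hbd]
      have hres := ih (i0 + 1) s (by omega)
      refine ⟨?_, hres.2.1, ?_⟩
      · rcases hres.1 with h | h
        · exact Or.inl h
        · exact Or.inr (List.mem_cons_of_mem _ h)
      · intro y hy
        rcases List.mem_cons.mp hy with h | h
        · have h1 := hres.2.1
          rw [h]
          unfold lexLe at h1 ⊢
          simp only
          omega
        · exact hres.2.2 y h

lemma findNearestA_min (ub : List Int) (tol x : Int) (hub : ub ≠ []) :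
    ∃ m, KMin (keysA ub x) m ∧ findNearestA ub tol x = (if m.1 ≤ tol then m.2 else -1) := by
  cases ub with
  | nil => exact absurd rfl hub
  | cons u0 t =>
    unfold findNearestA keysA
    rw [PySem.List.pyGetD_zero_cons, PySem.List.enumerate_cons, List.foldl_cons, List.map_cons]
    dsimp only
    simp only [zero_add]
    rw [if_neg (by omega : ¬ |u0 - x| < |u0 - x|)]
    have hres := scan_min x t 1 (|u0 - x|, (0:Int)) (by simp)
    refine ⟨_, ⟨?_, ?_⟩, rfl⟩
    · rcases hres.1 with h | h
      · rw [h]; exact List.mem_cons_self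
      · exact List.mem_cons_of_mem _ h
    · intro y hy
      rcases List.mem_cons.mp hy with h | h
      · rw [h]; exact hres.2.1
      · exact hres.2.2 y h

-- ---------- sorted2 produces a lexLe-pairwise list ----------

lemma not_lexLt_iff (a b : Int × Int) :
    ((decide (a.1 < b.1) || (!decide (b.1 < a.1) && decide (a.2 < b.2))) = false) ↔ lexLe b a := by
  unfold lexLe
  simp only [Bool.or_eq_false_iff, Bool.and_eq_false_iff, decide_eq_false_iff_not, not_lt,
    Bool.not_eq_false', decide_eq_true_eq]
  omega

lemma insertBy_pw (x : Int × Int) (ys : List (Int × Int)) (h : ys.Pairwise lexLe) :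
    (PySem.List.insertBy (fun a b => decide (a.1 < b.1) || (!decide (b.1 < a.1) && decide (a.2 < b.2))) x ys).Pairwise lexLe := by
  induction ys with
  | nil => simp [PySem.List.insertBy]
  | cons y ys ih =>
    have h' := List.pairwise_cons.mp h
    rw [PySem.List.insertBy]
    by_cases hb : (decide (x.1 < y.1) || (!decide (y.1 < x.1) && decide (x.2 < y.2))) = true
    · rw [if_pos hb]
      simp only [Bool.or_eq_true, Bool.and_eq_true, Bool.not_eq_true', decide_eq_true_eq,
        decide_eq_false_iff_not] at hb
      refine List.pairwise_cons.mpr ⟨?_, h⟩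
      intro z hz
      rcases List.mem_cons.mp hz with hh | hh
      · subst hh; unfold lexLe; omega
      · have hyz := h'.1 z hh
        unfold lexLe at hyz ⊢
        omega
    · rw [if_neg hb]
      refine List.pairwise_cons.mpr ⟨?_, ih h'.2⟩
      intro w hw
      rcases (PySem.List.mem_insertBy _ _ _ _).mp hw with hh | hh
      · subst hh
        exact (not_lexLt_iff _ _).mp (Bool.not_eq_true _ ▸ eq_false_of_ne_true hb)
      · exact h'.1 w hh

lemma foldl_insertBy_pw (l : List (Int × Int)) : ∀ (acc : List (Int × Int)), acc.Pairwise lexLe →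
    (l.foldl (fun acc p => PySem.List.insertBy
      (fun a b => decide (a.1 < b.1) || (!decide (b.1 < a.1) && decide (a.2 < b.2))) p acc) acc).Pairwise lexLe := by
  induction l with
  | nil => intro acc h; simpa using h
  | cons p rest ih =>
    intro acc h
    rw [List.foldl_cons]
    exact ih _ (insertBy_pw p acc h)

lemma pairs_pw (E : List (Int × Int)) :
    (PySem.List.sorted2 E Prod.fst Prod.snd).Pairwise lexLe := by
  have heq : PySem.List.sorted2 E Prod.fst Prod.snd =
      E.foldl (fun acc p => PySem.List.insertBy
        (fun a b => decide (a.1 < b.1) || (!decide (b.1 < a.1) && decide (a.2 < b.2))) p acc) [] := rfl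
  rw [heq]
  exact foldl_insertBy_pw E [] (by simp)

-- ---------- the dedup loop ----------

def dedupRec : Option Int → List (Int × Int) → List (Int × Int)
  | _, [] => []
  | none, p :: rest => p :: dedupRec (some p.1) rest
  | some v, p :: rest => if p.1 = v then dedupRec (some v) rest else p :: dedupRec (some p.1) rest

lemma dedupLoop_eq_aux (l : List (Int × Int)) : ∀ (acc : List (Int × Int)) (pr : Option Int),
    (l.foldl (fun (s : List (Int × Int) × Option Int) p =>
      (match s.2 with
       | none => s.1 ++ [p]
       | some v => if p.1 ≠ v then s.1 ++ [p] else s.1,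
       some p.1)) (acc, pr)).1 = acc ++ dedupRec pr l := by
  induction l with
  | nil => intro acc pr; cases pr <;> simp [dedupRec]
  | cons p rest ih =>
    intro acc pr
    rw [List.foldl_cons]
    cases pr with
    | none => simpa [dedupRec] using ih (acc ++ [p]) (some p.1)
    | some v =>
      by_cases hv : p.1 = v
      · simpa [dedupRec, hv] using ih acc (some p.1)
      · simpa [dedupRec, hv] using ih (acc ++ [p]) (some p.1)

lemma dedupLoop_eq (l : List (Int × Int)) : dedupLoop l = dedupRec none l := by
  unfold dedupLoop
  simpa using dedupLoop_eq_aux l [] none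

lemma dedup_subset : ∀ (pr : Option Int) (l : List (Int × Int)), dedupRec pr l ⊆ l := by
  intro pr l
  induction l generalizing pr with
  | nil => cases pr <;> simp [dedupRec]
  | cons p rest ih =>
    cases pr with
    | none =>
      intro a ha
      simp only [dedupRec, List.mem_cons] at ha ⊢
      rcases ha with h | h
      · exact Or.inl h
      · exact Or.inr (ih _ h)
    | some v =>
      intro a ha
      simp only [dedupRec] at ha
      by_cases hv : p.1 = v
      · rw [if_pos hv] at ha
        exact List.mem_cons_of_mem _ (ih _ ha)
      · rw [if_neg hv] at ha
        rcases List.mem_cons.mp ha with h | h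
        · simp [h]
        · exact List.mem_cons_of_mem _ (ih _ h)

lemma dedup_cover_some (l : List (Int × Int)) : ∀ (v : Int), l.Pairwise lexLe →
    ∀ p ∈ l, p.1 = v ∨ ∃ q ∈ dedupRec (some v) l, q.1 = p.1 ∧ q.2 ≤ p.2 := by
  induction l with
  | nil => simp
  | cons p0 rest ih =>
    intro v hpw p hp
    have hpw' := List.pairwise_cons.mp hpw
    by_cases hv : p0.1 = v
    · rcases List.mem_cons.mp hp with h | h
      · left; rw [h]; exact hv
      · rcases ih v hpw'.2 p h with h1 | ⟨q, hq, hq1, hq2⟩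
        · left; exact h1
        · right; exact ⟨q, by simp [dedupRec, hv]; exact hq, hq1, hq2⟩
    · rcases List.mem_cons.mp hp with h | h
      · right; exact ⟨p0, by simp [dedupRec, hv], by rw [h], by rw [h]⟩
      · rcases ih p0.1 hpw'.2 p h with h1 | ⟨q, hq, hq1, hq2⟩
        · right
        
          refine ⟨p0, by simp [dedupRec, hv], h1.symm, ?_⟩
          have hle := hpw'.1 p h
          unfold lexLe at hle
          omega
        · right
          refine ⟨q, ?_, hq1, hq2⟩
          simp [dedupRec, hv]
          right; exact hq

lemma dedup_cover (l : List (Int × Int)) (h : l.Pairwise lexLe) :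
    ∀ p ∈ l, ∃ q ∈ dedupRec none l, q.1 = p.1 ∧ q.2 ≤ p.2 := by
  cases l with
  | nil => simp
  | cons p0 rest =>
    intro p hp
    have hpw' := List.pairwise_cons.mp h
    rcases List.mem_cons.mp hp with hh | hh
    · exact ⟨p0, by simp [dedupRec], by rw [hh], by rw [hh]⟩
    · rcases dedup_cover_some rest p0.1 hpw'.2 p hh with h1 | ⟨q, hq, hq1, hq2⟩
      · refine ⟨p0, by simp [dedupRec], h1.symm, ?_⟩
        have hle := hpw'.1 p hh
        unfold lexLe at hle
        omega
      · refine ⟨q, ?_, hq1, hq2⟩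
        simp only [dedupRec, List.mem_cons]
        right; exact hq

lemma dedup_chain_some (l : List (Int × Int)) : ∀ (v : Int), l.Pairwise lexLe →
    (∀ p ∈ l, v ≤ p.1) →
    (dedupRec (some v) l).Pairwise (fun a b => a.1 < b.1) ∧ ∀ q ∈ dedupRec (some v) l, v < q.1 := by
  induction l with
  | nil => intro v _ _; simp [dedupRec]
  | cons p0 rest ih =>
    intro v hpw hge
    have hpw' := List.pairwise_cons.mp hpw
    have hrest : ∀ p ∈ rest, p0.1 ≤ p.1 := by
      intro p hp
      have hle := hpw'.1 p hp
      unfold lexLe at hle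
      omega
    by_cases hv : p0.1 = v
    · have hge' : ∀ p ∈ rest, v ≤ p.1 := fun p hp => hv ▸ hrest p hp
      have hres := ih v hpw'.2 hge'
      constructor
      · simp only [dedupRec, if_pos hv]
        exact hres.1
      · intro q hq
        simp only [dedupRec, if_pos hv] at hq
        exact hres.2 q hq
    · have hres := ih p0.1 hpw'.2 hrest
      have hvlt : v < p0.1 := lt_of_le_of_ne (hge p0 (by simp)) (fun hh => hv hh.symm)
      constructor
      · simp only [dedupRec, if_neg hv]
        exact List.pairwise_cons.mpr ⟨fun q hq => hres.2 q hq, hres.1⟩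
      · intro q hq
        simp only [dedupRec, if_neg hv, List.mem_cons] at hq
        rcases hq with h | h
        · rw [h]; exact hvlt
        · exact lt_trans hvlt (hres.2 q h)

lemma dedup_chain (l : List (Int × Int)) (h : l.Pairwise lexLe) :
    (dedupRec none l).Pairwise (fun a b => a.1 < b.1) := by
  cases l with
  | nil => simp [dedupRec]
  | cons p0 rest =>
    have hpw' := List.pairwise_cons.mp h
    have hrest : ∀ p ∈ rest, p0.1 ≤ p.1 := by
      intro p hp
      have hle := hpw'.1 p hp
      unfold lexLe at hle
      omega
    have hres := dedup_chain_some rest p0.1 hpw'.2 hrest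
    simp only [dedupRec]
    exact List.pairwise_cons.mpr ⟨fun q hq => hres.2 q hq, hres.1⟩

lemma dedup_ne (l : List (Int × Int)) (h : l ≠ []) : dedupRec none l ≠ [] := by
  cases l with
  | nil => exact absurd rfl h
  | cons p rest => simp [dedupRec]

-- ---------- binary search ----------

lemma blLoop_step (a : List Int) (x : Int) (lo hi : Nat) (h : lo < hi) :
    blLoop a x lo hi =
      if a.getD ((lo + hi) / 2) 0 < x then blLoop a x ((lo + hi) / 2 + 1) hi
      else blLoop a x lo ((lo + hi) / 2) := by
  rw [blLoop.eq_def, dif_pos h]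

lemma blLoop_stop (a : List Int) (x : Int) (lo hi : Nat) (h : ¬ lo < hi) :
    blLoop a x lo hi = lo := by
  rw [blLoop.eq_def, dif_neg h]

lemma blLoop_spec (a : List Int) (x : Int) (hsorted : a.Pairwise (· ≤ ·)) :
    ∀ (lo hi : Nat), hi ≤ a.length → lo ≤ hi →
    (∀ k (hk : k < a.length), k < lo → a[k] < x) →
    (∀ k (hk : k < a.length), hi ≤ k → x ≤ a[k]) →
    lo ≤ blLoop a x lo hi ∧ blLoop a x lo hi ≤ hi ∧
    (∀ k (hk : k < a.length), k < blLoop a x lo hi → a[k] < x) ∧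
    (∀ k (hk : k < a.length), blLoop a x lo hi ≤ k → x ≤ a[k]) := by
  have mono : ∀ (i j : Nat) (hj : j < a.length) (hij : i ≤ j), a[i]'(by omega) ≤ a[j] := by
    intro i j hj hij
    rcases Nat.eq_or_lt_of_le hij with rfl | hlt
    · exact le_refl _
    · exact List.pairwise_iff_getElem.mp hsorted i j (by omega) hj hlt
  intro lo hi
  generalize hn : hi - lo = n
  induction n using Nat.strong_induction_on generalizing lo hi with
  | _ n ih =>
    intro hhi hlohi hlo hup
    by_cases h : lo < hi
    · have hm1 : lo ≤ (lo + hi) / 2 := by omega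
      have hm2 : (lo + hi) / 2 < hi := by omega
      have hmlen : (lo + hi) / 2 < a.length := by omega
      rw [blLoop_step a x lo hi h, List.getD_eq_getElem a 0 hmlen]
      by_cases hcmp : a[(lo + hi) / 2] < x
      · rw [if_pos hcmp]
        have hres := ih (hi - ((lo + hi) / 2 + 1)) (by omega) ((lo + hi) / 2 + 1) hi (by omega)
          hhi (by omega) ?_ hup
        · exact ⟨by omega, hres.2.1, hres.2.2.1, hres.2.2.2⟩
        · intro k hk hklt
          calc a[k] ≤ a[(lo + hi) / 2] := mono k _ hmlen (by omega)
            _ < x := hcmp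
      · rw [if_neg hcmp]
        have hres := ih ((lo + hi) / 2 - lo) (by omega) lo ((lo + hi) / 2) (by omega)
          (by omega) (by omega) hlo ?_
        · exact ⟨hres.1, by omega, hres.2.2.1, hres.2.2.2⟩
        · intro k hk hkge
          calc x ≤ a[(lo + hi) / 2] := not_lt.mp hcmp
            _ ≤ a[k] := mono _ k hk hkge
    · rw [blLoop_stop a x lo hi h]
      exact ⟨le_refl _, by omega, fun k hk hklt => hlo k hk hklt, fun k hk hkge => by
        by_cases hkhi : hi ≤ k
        · exact hup k hk hkhi
        · exact absurd (by omega : lo < hi) h⟩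

-- ---------- B's nearest is the lexicographic minimum ----------

lemma lexLe_trans {a b c : Int × Int} (h1 : lexLe a b) (h2 : lexLe b c) : lexLe a c := by
  unfold lexLe at *; omega

lemma kmin_transfer {l l' : List (Int × Int)} (hp : l.Perm l') {m : Int × Int}
    (h : KMin l m) : KMin l' m :=
  ⟨hp.subset h.1, fun y hy => h.2 y (hp.symm.subset hy)⟩

lemma nearestB_min (ub : List Int) (tol x : Int) (hub : ub ≠ []) :
    ∃ m, KMin (keysA ub x) m ∧
      nearestB
        (dedupLoop (PySem.List.sorted2 ((PySem.List.enumerate ub).map (fun p => (p.2, p.1))) Prod.fst Prod.snd))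
        ((dedupLoop (PySem.List.sorted2 ((PySem.List.enumerate ub).map (fun p => (p.2, p.1))) Prod.fst Prod.snd)).map Prod.fst)
        tol x = (if m.1 ≤ tol then m.2 else -1) := by
  rw [dedupLoop_eq]
  set E := (PySem.List.enumerate ub).map (fun p => ((p.2 : Int), (p.1 : Int))) with hE
  set prs := PySem.List.sorted2 E Prod.fst Prod.snd with hprs
  have hperm : prs.Perm E := PySem.List.sorted2_perm E Prod.fst Prod.snd false
  have hpw : prs.Pairwise lexLe := pairs_pw E
  set uq := dedupRec none prs with huq
  have hchain : uq.Pairwise (fun a b => a.1 < b.1) := dedup_chain prs hpw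
  have hsub : uq ⊆ prs := dedup_subset none prs
  have hcov := dedup_cover prs hpw
  have hEne : E ≠ [] := by
    cases ub with
    | nil => exact absurd rfl hub
    | cons u0 t => simp [hE, PySem.List.enumerate_cons]
  have hprsne : prs ≠ [] := by
    intro hnil
    exact hEne ((hnil ▸ hperm).symm.eq_nil)
  have huqne : uq ≠ [] := dedup_ne prs hprsne
  have hnpos : 0 < uq.length := List.length_pos_iff.mpr huqne
  have hvals : (uq.map Prod.fst).Pairwise (fun a b => a ≤ b) :=
    List.Pairwise.map Prod.fst (fun {a b} h => le_of_lt h) hchain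
  set uvals := uq.map Prod.fst with huvals
  have hlenv : uvals.length = uq.length := List.length_map ..
  obtain ⟨-, hposle, hlt, hge⟩ := blLoop_spec uvals x hvals 0 uvals.length (le_refl _)
    (Nat.zero_le _) (fun k hk hk0 => absurd hk0 (Nat.not_lt_zero k))
    (fun k hk hkge => absurd hk (by omega))
  set pos := blLoop uvals x 0 uvals.length with hpos
  have hvk : ∀ (k : Nat) (hk : k < uq.length), uvals[k]'(by omega) = (uq[k]'hk).1 := by
    intro k hk
    simp [huvals]
  have hmono : ∀ (i j : Nat) (hj : j < uq.length) (hij : i < j), (uq[i]'(by omega)).1 < (uq[j]'hj).1 := by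
    intro i j hj hij
    exact List.pairwise_iff_getElem.mp hchain i j (by omega) hj hij
  have hltq : ∀ (k : Nat) (hk : k < uq.length), k < pos → (uq[k]'hk).1 < x := by
    intro k hk hkp
    have := hlt k (by omega) hkp
    rwa [hvk k hk] at this
  have hgeq : ∀ (k : Nat) (hk : k < uq.length), pos ≤ k → x ≤ (uq[k]'hk).1 := by
    intro k hk hkp
    have := hge k (by omega) hkp
    rwa [hvk k hk] at this
  -- transfer of minimality to keysA
  have hkeysperm : (prs.map (fun p => (|p.1 - x|, p.2))).Perm (keysA ub x) := by
    have h1 : (E.map (fun p => (|p.1 - x|, p.2))) = keysA ub x := by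
      unfold keysA
      rw [hE, List.map_map]
      rfl
    rw [← h1]
    exact hperm.map _
  have hdomU : ∀ bst : Int × Int,
      (∀ (k : Nat) (hk : k < uq.length), lexLe bst (|(uq[k]'hk).1 - x|, (uq[k]'hk).2)) →
      ∀ p ∈ prs, lexLe bst (|p.1 - x|, p.2) := by
    intro bst hU p hp
    obtain ⟨q, hq, hq1, hq2⟩ := hcov p hp
    obtain ⟨k, hk, hkq⟩ := List.mem_iff_getElem.mp hq
    have h1 := hU k hk
    rw [hkq] at h1
    have h3 : |q.1 - x| = |p.1 - x| := by rw [hq1]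
    unfold lexLe at h1 ⊢
    omega
  -- reduce nearestB
  simp only [nearestB]
  clear hpos
  by_cases hplt : pos < uq.length
  · have hgd : uq.getD pos (0, 0) = uq[pos]'hplt := List.getD_eq_getElem uq (0, 0) hplt
    have hxle : x ≤ (uq[pos]'hplt).1 := hgeq pos hplt (le_refl _)
    have hb0key : ((uq[pos]'hplt).1 - x, (uq[pos]'hplt).2) = (|(uq[pos]'hplt).1 - x|, (uq[pos]'hplt).2) := by
      rw [abs_of_nonneg (by omega)]
    have hb0dom : ∀ (k : Nat) (hk : k < uq.length), pos ≤ k →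
        lexLe ((uq[pos]'hplt).1 - x, (uq[pos]'hplt).2) (|(uq[k]'hk).1 - x|, (uq[k]'hk).2) := by
      intro k hk hpk
      have hxk : x ≤ (uq[k]'hk).1 := hgeq k hk hpk
      rw [abs_of_nonneg (by omega)]
      rcases Nat.eq_or_lt_of_le hpk with heq | hlt2
      · subst heq
        unfold lexLe; omega
      · have := hmono pos k hk hlt2
        unfold lexLe; omega
    rw [if_pos hplt, hgd]
    by_cases hp0 : 0 < pos
    · have hp1 : pos - 1 < uq.length := by omega
      have hgd1 : uq.getD (pos - 1) (0, 0) = uq[pos - 1]'hp1 := List.getD_eq_getElem uq (0, 0) hp1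
      have hq1lt : (uq[pos - 1]'hp1).1 < x := hltq (pos - 1) hp1 (by omega)
      have hcandkey : (x - (uq[pos - 1]'hp1).1, (uq[pos - 1]'hp1).2)
          = (|(uq[pos - 1]'hp1).1 - x|, (uq[pos - 1]'hp1).2) := by
        rw [abs_of_neg (by omega)]; ring_nf
      have hcanddom : ∀ (k : Nat) (hk : k < uq.length), k < pos →
          lexLe (x - (uq[pos - 1]'hp1).1, (uq[pos - 1]'hp1).2) (|(uq[k]'hk).1 - x|, (uq[k]'hk).2) := by
        intro k hk hkp
        have hxk : (uq[k]'hk).1 < x := hltq k hk hkp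
        rw [abs_of_neg (by omega)]
        rcases Nat.eq_or_lt_of_le (by omega : k ≤ pos - 1) with heq | hlt2
        · subst heq
          unfold lexLe; omega
        · have := hmono k (pos - 1) hp1 hlt2
          unfold lexLe; omega
      rw [if_pos hp0, hgd1]
      dsimp only
      by_cases hcc : x - (uq[pos - 1]'hp1).1 < (uq[pos]'hplt).1 - x ∨
          (x - (uq[pos - 1]'hp1).1 = (uq[pos]'hplt).1 - x ∧ (uq[pos - 1]'hp1).2 < (uq[pos]'hplt).2)
      · rw [if_pos hcc]
        refine ⟨(x - (uq[pos - 1]'hp1).1, (uq[pos - 1]'hp1).2), ?_, rfl⟩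
        apply kmin_transfer hkeysperm
        constructor
        · rw [hcandkey]
          exact List.mem_map_of_mem (hsub (List.getElem_mem hp1))
        · intro y hy
          obtain ⟨p, hp, hpy⟩ := List.mem_map.mp hy
          rw [← hpy]
          refine hdomU _ ?_ p hp
          intro k hk
          by_cases hkp : k < pos
          · exact hcanddom k hk hkp
          · refine lexLe_trans ?_ (hb0dom k hk (by omega))
            unfold lexLe; omega
      · rw [if_neg hcc]
        refine ⟨((uq[pos]'hplt).1 - x, (uq[pos]'hplt).2), ?_, rfl⟩
        apply kmin_transfer hkeysperm
        constructor
        · rw [hb0key]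
          exact List.mem_map_of_mem (hsub (List.getElem_mem hplt))
        · intro y hy
          obtain ⟨p, hp, hpy⟩ := List.mem_map.mp hy
          rw [← hpy]
          refine hdomU _ ?_ p hp
          intro k hk
          by_cases hkp : k < pos
          · refine lexLe_trans ?_ (hcanddom k hk hkp)
            unfold lexLe; omega
          · exact hb0dom k hk (by omega)
    · rw [if_neg hp0]
      refine ⟨((uq[pos]'hplt).1 - x, (uq[pos]'hplt).2), ?_, rfl⟩
      apply kmin_transfer hkeysperm
      constructor
      · rw [hb0key]
        exact List.mem_map_of_mem (hsub (List.getElem_mem hplt))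
      · intro y hy
        obtain ⟨p, hp, hpy⟩ := List.mem_map.mp hy
        rw [← hpy]
        refine hdomU _ ?_ p hp
        intro k hk
        exact hb0dom k hk (by omega)
  · have hpeq : pos = uq.length := by omega
    have hp0 : 0 < pos := by omega
    have hp1 : pos - 1 < uq.length := by omega
    have hgd1 : uq.getD (pos - 1) (0, 0) = uq[pos - 1]'hp1 := List.getD_eq_getElem uq (0, 0) hp1
    have hq1lt : (uq[pos - 1]'hp1).1 < x := hltq (pos - 1) hp1 (by omega)
    have hcandkey : (x - (uq[pos - 1]'hp1).1, (uq[pos - 1]'hp1).2)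
        = (|(uq[pos - 1]'hp1).1 - x|, (uq[pos - 1]'hp1).2) := by
      rw [abs_of_neg (by omega)]; ring_nf
    have hcanddom : ∀ (k : Nat) (hk : k < uq.length), k < pos →
        lexLe (x - (uq[pos - 1]'hp1).1, (uq[pos - 1]'hp1).2) (|(uq[k]'hk).1 - x|, (uq[k]'hk).2) := by
      intro k hk hkp
      have hxk : (uq[k]'hk).1 < x := hltq k hk hkp
      rw [abs_of_neg (by omega)]
      rcases Nat.eq_or_lt_of_le (by omega : k ≤ pos - 1) with heq | hlt2
      · subst heq
        unfold lexLe; omega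
      · have := hmono k (pos - 1) hp1 hlt2
        unfold lexLe; omega
    rw [if_neg hplt, if_pos hp0, hgd1]
    dsimp only
    refine ⟨(x - (uq[pos - 1]'hp1).1, (uq[pos - 1]'hp1).2), ?_, rfl⟩
    apply kmin_transfer hkeysperm
    constructor
    · rw [hcandkey]
      exact List.mem_map_of_mem (hsub (List.getElem_mem hp1))
    · intro y hy
      obtain ⟨p, hp, hpy⟩ := List.mem_map.mp hy
      rw [← hpy]
      refine hdomU _ ?_ p hp
      intro k hk
      exact hcanddom k hk (by omega)

lemma nearest_eq (ub : List Int) (tol x : Int) (hub : ub ≠ []) :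
    nearestB
      (dedupLoop (PySem.List.sorted2 ((PySem.List.enumerate ub).map (fun p => (p.2, p.1))) Prod.fst Prod.snd))
      ((dedupLoop (PySem.List.sorted2 ((PySem.List.enumerate ub).map (fun p => (p.2, p.1))) Prod.fst Prod.snd)).map Prod.fst)
      tol x = findNearestA ub tol x := by
  obtain ⟨m, hm, hB⟩ := nearestB_min ub tol x hub
  obtain ⟨m', hm', hA⟩ := findNearestA_min ub tol x hub
  rw [hB, hA, kmin_unique hm hm']

lemma pyGetD_map_in {α β : Type} (l : List α) (f : α → β) (c : Int) (d : α) (d' : β)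
    (h0 : 0 ≤ c) (h1 : c < l.length) :
    PySem.List.pyGetD (l.map f) c d' = f (PySem.List.pyGetD l c d) := by
  rw [PySem.List.pyGetD_eq_getElem (l.map f) d' h0 (by simpa using h1),
      PySem.List.pyGetD_eq_getElem l d h0 h1]
  simp

-- ===== VERDICT (by name: the statement is the Claim_ definition above) =====
theorem map_columns_to_unified_spec : Claim_equal_map_columns_to_unified := by
  intro tb ub tol _hdom hpre
  unfold Spec_map_columns_to_unified
  unfold map_columns_to_unified map_columns_to_unified_alt
  by_cases hlen : tb.length < 2
  · rw [if_pos hlen]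
    rw [PySem.List.pyRange_one_eq_nil (by omega)]
    rfl
  · have hub : ub ≠ [] := hpre (by omega)
    rw [if_neg hlen]
    simp only []
    congr 1
    apply PySem.List.foldl_congr_mem
    intro m c hc
    rw [PySem.List.mem_pyRange_one] at hc
    have hc1 : c < (tb.length : Int) := by omega
    have hc2 : c + 1 < (tb.length : Int) := by omega
    rw [pyGetD_map_in tb _ c 0 0 hc.1 (by exact_mod_cast hc1),
        pyGetD_map_in tb _ (c+1) 0 0 (by omega) (by exact_mod_cast hc2),
        nearest_eq ub tol _ hub, nearest_eq ub tol _ hub]
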